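-- pv_equiv track=rewrite | github.com/marcosseunick/exercicios_faculdade_python | semestre_02/lista_03/ex001.py | computar_faixas
-- ===== SOURCE A (Python) =====
-- def computar_faixas(notas):
--     faixa_0_2 = 0
--     faixa_2_4 = 0
--     faixa_4_6 = 0
--     faixa_6_8 = 0
--     faixa_8_10 = 0
--
--     for nota in notas:
--         if nota >= 0 and nota < 2:
--             faixa_0_2 += 1
--         elif nota >= 2 and nota < 4:
--             faixa_2_4 += 1
--         elif nota >= 4 and nota < 6:
--             faixa_4_6 += 1
--         elif nota >= 6 and nota < 8:
--             faixa_6_8 += 1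
--         elif nota >= 8 and nota <= 10:
--             faixa_8_10 += 1
--
--     return faixa_0_2, faixa_2_4, faixa_4_6, faixa_6_8, faixa_8_10
-- ===== SOURCE B (Python) =====
-- def computar_faixas(notas):
--     def conta(lo, hi):
--         return sum(1 for nota in notas if lo <= nota < hi)
--     return (conta(0, 2), conta(2, 4), conta(4, 6), conta(6, 8),
--             sum(1 for nota in notas if 8 <= nota <= 10))
-- ===== Notes on version B (the rewrite author's own statement) =====
-- stated objective: alternative
-- what changed: Replaces the single-pass if-elif accumulator loop with five independent counting passes, one sum-of-matches per range (the last range closed at 10); correct because the five ranges are disjoint so each element is counted by exactly the pass whose range contains it.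
import Mathlib
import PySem

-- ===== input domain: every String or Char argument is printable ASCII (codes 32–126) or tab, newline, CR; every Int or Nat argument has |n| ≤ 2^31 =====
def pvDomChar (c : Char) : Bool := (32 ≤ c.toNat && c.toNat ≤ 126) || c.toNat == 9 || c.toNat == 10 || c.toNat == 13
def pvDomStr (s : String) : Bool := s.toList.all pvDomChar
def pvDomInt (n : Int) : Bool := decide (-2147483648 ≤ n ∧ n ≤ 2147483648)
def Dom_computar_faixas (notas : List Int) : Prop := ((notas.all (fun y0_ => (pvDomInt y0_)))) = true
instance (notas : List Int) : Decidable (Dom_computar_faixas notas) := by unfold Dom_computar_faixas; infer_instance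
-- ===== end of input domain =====

-- B replaces A's single-pass if-elif accumulator loop with five independent
-- counting passes (one count per disjoint range); same cost, different decomposition.


-- ===== PORT A =====
-- literal transliteration of A: five counters, if-elif cascade, one loop
def computar_faixas_go (notas : List Int) (f02 f24 f46 f68 f810 : Int) :
    Int × Int × Int × Int × Int :=
  match notas with
  | [] => (f02, f24, f46, f68, f810)
  | nota :: rest =>
    if nota ≥ 0 ∧ nota < 2 then computar_faixas_go rest (f02 + 1) f24 f46 f68 f810
    else if nota ≥ 2 ∧ nota < 4 then computar_faixas_go rest f02 (f24 + 1) f46 f68 f810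
    else if nota ≥ 4 ∧ nota < 6 then computar_faixas_go rest f02 f24 (f46 + 1) f68 f810
    else if nota ≥ 6 ∧ nota < 8 then computar_faixas_go rest f02 f24 f46 (f68 + 1) f810
    else if nota ≥ 8 ∧ nota ≤ 10 then computar_faixas_go rest f02 f24 f46 f68 (f810 + 1)
    else computar_faixas_go rest f02 f24 f46 f68 f810

def computar_faixas (notas : List Int) : Int × Int × Int × Int × Int :=
  computar_faixas_go notas 0 0 0 0 0

-- ===== PORT B =====
-- literal transliteration of B: sum(1 for nota in notas if lo <= nota < hi) is a
-- count of matches, ported as List.countP; five independent passes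
def conta (notas : List Int) (lo hi : Int) : Int :=
  (notas.countP (fun nota => decide (lo ≤ nota ∧ nota < hi)) : Int)

def computar_faixas_alt (notas : List Int) : Int × Int × Int × Int × Int :=
  (conta notas 0 2, conta notas 2 4, conta notas 4 6, conta notas 6 8,
   (notas.countP (fun nota => decide (8 ≤ nota ∧ nota ≤ 10)) : Int))

-- ===== PRECONDITION & SPEC =====
def Spec_computar_faixas (notas : List Int) (out : Int × Int × Int × Int × Int) : Prop := out = computar_faixas_alt notas
instance (notas : List Int) (out : Int × Int × Int × Int × Int) : Decidable (Spec_computar_faixas notas out) := by unfold Spec_computar_faixas; infer_instance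

-- ===== CLAIM (what is proved, stated in full; the proofs are below) =====
def Claim_equal_computar_faixas : Prop := ∀ (notas : List Int), Dom_computar_faixas notas → Spec_computar_faixas notas (computar_faixas notas)

-- ===== LEMMAS AND PROOFS =====

lemma conta_cons (x : Int) (rest : List Int) (lo hi : Int) :
    conta (x :: rest) lo hi =
      conta rest lo hi + (if lo ≤ x ∧ x < hi then 1 else 0) := by
  simp only [conta, List.countP_cons]
  split_ifs with h <;> simp_all

lemma conta8_cons (x : Int) (rest : List Int) :
    ((x :: rest).countP (fun nota => decide (8 ≤ nota ∧ nota ≤ 10)) : Int) =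
      (rest.countP (fun nota => decide (8 ≤ nota ∧ nota ≤ 10)) : Int) +
        (if 8 ≤ x ∧ x ≤ 10 then 1 else 0) := by
  simp only [List.countP_cons]
  split_ifs with h <;> simp_all

-- invariant: A's accumulator loop ends with each counter increased by the
-- number of elements of its (disjoint) range
lemma go_eq_counts (notas : List Int) : ∀ (a b c d e : Int),
    computar_faixas_go notas a b c d e =
      (a + conta notas 0 2, b + conta notas 2 4, c + conta notas 4 6,
       d + conta notas 6 8,
       e + (notas.countP (fun nota => decide (8 ≤ nota ∧ nota ≤ 10)) : Int)) := by
  induction notas with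
  | nil => intro a b c d e; simp [computar_faixas_go, conta]
  | cons nota rest ih =>
    intro a b c d e
    rw [computar_faixas_go]
    split_ifs with h1 h2 h3 h4 h5 <;>
      rw [ih, conta_cons, conta_cons, conta_cons, conta_cons, conta8_cons] <;>
      refine Prod.ext ?_ (Prod.ext ?_ (Prod.ext ?_ (Prod.ext ?_ ?_))) <;>
      simp only [] <;> split_ifs <;> omega

-- ===== VERDICT (by name: the statement is the Claim_ definition above) =====
theorem computar_faixas_spec : Claim_equal_computar_faixas := by
  intro notas _
  show computar_faixas notas = computar_faixas_alt notas
  rw [computar_faixas, go_eq_counts, computar_faixas_alt]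
  simp
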